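-- pv_equiv track=rewrite | github.com/loplop-h/rewind | src/rewind/export/privacy.py | is_sensitive_path
-- ===== SOURCE A (Python) =====
-- def is_sensitive_path(path: str) -> bool:
--     """Heuristic check used by the export to skip sensitive files entirely."""
--
--     lowered = path.lower()
--     sensitive = (
--         ".env",
--         ".pem",
--         ".key",
--         "id_rsa",
--         ".aws/credentials",
--         ".npmrc",
--         ".pypirc",
--     )
--     return any(lowered.endswith(s) or s in lowered for s in sensitive)
-- ===== SOURCE B (Python) =====
-- def is_sensitive_path(path: str) -> bool:
--     """Single left-to-right sweep: at each position check whether some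
--     sensitive pattern starts there (the endswith test of the original is
--     subsumed by substring containment)."""
--     lowered = path.lower()
--     patterns = (
--         ".env",
--         ".pem",
--         ".key",
--         "id_rsa",
--         ".aws/credentials",
--         ".npmrc",
--         ".pypirc",
--     )
--     for i in range(len(lowered)):
--         for p in patterns:
--             if lowered.startswith(p, i):
--                 return True
--     return False
-- ===== Notes on version B (the rewrite author's own statement) =====
-- stated objective: alternative
-- what changed: Instead of seven independent endswith/substring scans over the whole string, B makes one sweep over the positions of the lowered string, testing at each offset whether any pattern starts there; the redundant endswith checks disappear (they are subsumed by containment).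
import Mathlib
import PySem

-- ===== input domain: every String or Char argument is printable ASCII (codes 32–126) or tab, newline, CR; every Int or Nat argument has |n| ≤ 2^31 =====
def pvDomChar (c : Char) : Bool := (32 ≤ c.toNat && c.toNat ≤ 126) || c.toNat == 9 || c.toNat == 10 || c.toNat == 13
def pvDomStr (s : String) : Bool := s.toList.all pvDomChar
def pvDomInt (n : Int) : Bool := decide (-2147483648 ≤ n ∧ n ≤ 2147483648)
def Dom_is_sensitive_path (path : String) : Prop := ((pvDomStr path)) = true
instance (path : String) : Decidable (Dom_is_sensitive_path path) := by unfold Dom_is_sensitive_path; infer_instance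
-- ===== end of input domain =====

-- B replaces seven independent endswith/substring scans by one sweep over the
-- positions of the lowered string, testing at each position whether any
-- pattern starts there (the endswith tests are subsumed by containment).


-- ===== PORT A =====
def is_sensitive_path (path : String) : Bool :=
  let lowered := PySem.Str.lower path
  let sensitive : List String :=
    [".env", ".pem", ".key", "id_rsa", ".aws/credentials", ".npmrc", ".pypirc"]
  sensitive.any (fun s => PySem.Str.endswith lowered s || PySem.Str.isIn s lowered)

-- ===== PORT B =====
-- the pattern tuple, as lists of characters
def pvPats : List (List Char) :=
  [".env".toList, ".pem".toList, ".key".toList, "id_rsa".toList,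
   ".aws/credentials".toList, ".npmrc".toList, ".pypirc".toList]

-- 'for i in range(len(lowered)): if lowered.startswith(p, i) …' as structural recursion
-- over the successive suffixes of the lowered string
def pvSweep : List Char → Bool
  | [] => false
  | c :: t =>
    (pvPats.any (fun p => PySem.Chars.startswith (c :: t) p)) || pvSweep t

def is_sensitive_path_alt (path : String) : Bool :=
  let lowered := PySem.Str.lower path
  pvSweep lowered.toList

-- ===== PRECONDITION & SPEC =====
def Spec_is_sensitive_path (path : String) (out : Bool) : Prop := out = is_sensitive_path_alt path
instance (path : String) (out : Bool) : Decidable (Spec_is_sensitive_path path out) := by unfold Spec_is_sensitive_path; infer_instance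

-- ===== CLAIM (what is proved, stated in full; the proofs are below) =====
def Claim_equal_is_sensitive_path : Prop := ∀ (path : String), Dom_is_sensitive_path path → Spec_is_sensitive_path path (is_sensitive_path path)

-- ===== LEMMAS AND PROOFS =====

-- a pattern is contained in c::t iff it starts there or is contained in t
theorem pvIsIn_cons (p : List Char) (c : Char) (t : List Char) :
    PySem.Chars.isIn p (c :: t)
      = (PySem.Chars.startswith (c :: t) p || PySem.Chars.isIn p t) := by
  cases hb : (PySem.Chars.startswith (c :: t) p || PySem.Chars.isIn p t) with
  | true =>
    rw [PySem.Chars.isIn_iff_infix]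
    rcases Bool.or_eq_true_iff.mp hb with h | h
    · exact (PySem.Chars.startswith_iff _ _ |>.mp h).isInfix
    · exact List.infix_cons_iff.mpr (Or.inr ((PySem.Chars.isIn_iff_infix _ _).mp h))
  | false =>
    rcases Bool.or_eq_false_iff.mp hb with ⟨h1, h2⟩
    rw [PySem.Chars.isIn_eq_false_iff]
    intro hinf
    rcases List.infix_cons_iff.mp hinf with h | h
    · exact absurd ((PySem.Chars.startswith_iff _ _).mpr h) (by simp [h1])
    · exact absurd ((PySem.Chars.isIn_iff_infix _ _).mpr h) (by simp [h2])

-- any distributes over a pointwise disjunction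
theorem pvAny_or {α : Type} (l : List α) (p q : α → Bool) :
    (l.any fun x => p x || q x) = (l.any p || l.any q) := by
  induction l with
  | nil => rfl
  | cons a t ih =>
    simp only [List.any_cons, ih]
    cases p a <;> cases q a <;> simp

-- the sweep computes containment of some pattern (all patterns are nonempty)
theorem pvSweep_eq (l : List Char) :
    pvSweep l = pvPats.any (fun p => PySem.Chars.isIn p l) := by
  induction l with
  | nil => decide
  | cons c t ih =>
    rw [pvSweep, ih]
    simp only [pvIsIn_cons, pvAny_or]

-- endswith is subsumed by containment
theorem pvEndswith_subsumed (l p : List Char) :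
    (PySem.Chars.endswith l p || PySem.Chars.isIn p l) = PySem.Chars.isIn p l := by
  cases he : PySem.Chars.endswith l p with
  | false => simp
  | true =>
    simp only [Bool.true_or]
    symm
    rw [PySem.Chars.isIn_iff_infix]
    exact ((PySem.Chars.endswith_iff _ _).mp he).isInfix

-- ===== VERDICT (by name: the statement is the Claim_ definition above) =====
theorem is_sensitive_path_spec : Claim_equal_is_sensitive_path := by
  intro path _
  unfold Spec_is_sensitive_path is_sensitive_path is_sensitive_path_alt
  rw [pvSweep_eq]
  simp [pvPats, PySem.Str.endswith, PySem.Str.isIn, pvEndswith_subsumed]
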